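-- pv_equiv track=rewrite | github.com/hanzala-sohrab/CP | Codeforces/2148D.py | solve
-- ===== SOURCE A (Python) =====
-- from typing import List
--
-- def solve(a: List[int]) -> int:
--     a.sort(reverse=True)
--
--     odd_elements = [el for el in a if el % 2 == 1]
--     even_elements = [el for el in a if el % 2 == 0]
--
--     L = len(odd_elements)
--
--     if L == 0:
--         return 0
--
--     # two pointers
--     i, j = 0, L - 1
--
--     ans = sum(even_elements)
--
--     while j >= i:
--         ans += odd_elements[i]
--         i += 1
--         j -= 1
--
--     return ans
-- ===== SOURCE B (Python) =====
-- from typing import List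
--
-- # Note: A sorts `a` in place (descending); B does not modify `a`.
-- # Equivalence is about the return value only.
--
-- def _top_sum(k: int, xs: List[int]) -> int:
--     # sum of the k largest elements of xs, quickselect-style (0 <= k <= len(xs))
--     if k == 0:
--         return 0
--     if k == len(xs):
--         return sum(xs)
--     p = xs[len(xs) // 2]
--     hi = [x for x in xs if x > p]
--     eq = [x for x in xs if x == p]
--     lo = [x for x in xs if x < p]
--     if k <= len(hi):
--         return _top_sum(k, hi)
--     if k <= len(hi) + len(eq):
--         return sum(hi) + p * (k - len(hi))
--     return sum(hi) + sum(eq) + _top_sum(k - len(hi) - len(eq), lo)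
--
-- def solve(a: List[int]) -> int:
--     even_total = 0
--     odds = []
--     for x in a:
--         if x % 2 == 0:
--             even_total += x
--         else:
--             odds.append(x)
--     if not odds:
--         return 0
--     k = (len(odds) + 1) // 2
--     return even_total + _top_sum(k, odds)
-- ===== Notes on version B (the rewrite author's own statement) =====
-- stated objective: alternative
-- what changed: Instead of sorting the whole list and splitting it with a two-pointer loop, B makes one pass accumulating the even total and the odd elements, then computes the sum of the largest ceil(L/2) odds with a recursive quickselect-style three-way-partition top-k sum; B does not sort `a` in place (return-value equivalence).
import Mathlib
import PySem

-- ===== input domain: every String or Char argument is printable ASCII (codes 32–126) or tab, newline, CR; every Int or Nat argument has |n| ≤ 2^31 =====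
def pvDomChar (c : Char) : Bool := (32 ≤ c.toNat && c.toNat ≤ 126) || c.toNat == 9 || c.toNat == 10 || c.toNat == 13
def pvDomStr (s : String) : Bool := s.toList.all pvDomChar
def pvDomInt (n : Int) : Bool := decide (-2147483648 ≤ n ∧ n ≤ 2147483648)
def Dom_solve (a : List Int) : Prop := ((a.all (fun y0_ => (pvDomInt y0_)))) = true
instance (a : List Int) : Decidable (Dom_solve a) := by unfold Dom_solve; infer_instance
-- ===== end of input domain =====

-- B replaces A's full sort + even/odd split + two-pointer loop by one pass (even total +
-- odds list) and a quickselect-style recursive top-k sum over the odds (objective: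
-- alternative). A sorts `a` in place, B does not: the theorems are about the RETURN value only.

-- ===== PORT A =====
-- while j >= i: ans += odd_elements[i]; i += 1; j -= 1
-- (indices are always in range in A, so pyGetD with default 0 is exact here)
def solveLoop (odds : List Int) (i j ans : Int) : Int :=
  if j ≥ i then
    solveLoop odds (i + 1) (j - 1) (ans + PySem.List.pyGetD odds i 0)
  else ans
termination_by (j + 1 - i).toNat
decreasing_by omega

def solve (a : List Int) : Int :=
  let s := PySem.List.sorted a (fun x => x) true
  let odd_elements := s.filter (fun el => PySem.Int.mod el 2 == 1)
  let even_elements := s.filter (fun el => PySem.Int.mod el 2 == 0)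
  let L : Int := odd_elements.length
  if L == 0 then 0
  else solveLoop odd_elements 0 (L - 1) even_elements.sum

-- ===== PORT B =====
-- _top_sum: sum of the k largest elements of xs by three-way partition around xs[len//2].
-- fuel = xs.length at every call site makes the recursion structural (a pure totality guard;
-- the partition lists are strictly shorter than xs at every recursive call B makes).
def topSum (fuel : Nat) (k : Int) (xs : List Int) : Int :=
  match fuel with
  | 0 => 0
  | fuel + 1 =>
    if k == 0 then 0
    else if k == (xs.length : Int) then xs.sum
    else
      let p := PySem.List.pyGetD xs (PySem.Int.floordiv (xs.length : Int) 2) 0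
      let hi := xs.filter (fun x => decide (x > p))
      let eqs := xs.filter (fun x => x == p)
      let lo := xs.filter (fun x => decide (x < p))
      if k ≤ (hi.length : Int) then topSum fuel k hi
      else if k ≤ (hi.length : Int) + (eqs.length : Int) then
        hi.sum + p * (k - (hi.length : Int))
      else hi.sum + eqs.sum + topSum fuel (k - (hi.length : Int) - (eqs.length : Int)) lo

-- for x in a: if x % 2 == 0: even_total += x else: odds.append(x)
def solve_alt (a : List Int) : Int :=
  let st := a.foldl (fun (st : Int × List Int) x =>
      if PySem.Int.mod x 2 == 0 then (st.1 + x, st.2) else (st.1, st.2 ++ [x])) (0, [])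
  let even_total := st.1
  let odds := st.2
  if odds.isEmpty then 0
  else
    let k := PySem.Int.floordiv ((odds.length : Int) + 1) 2
    even_total + topSum odds.length k odds

-- ===== PRECONDITION & SPEC =====
def Spec_solve (a : List Int) (out : Int) : Prop := out = solve_alt a
instance (a : List Int) (out : Int) : Decidable (Spec_solve a out) := by unfold Spec_solve; infer_instance

-- ===== CLAIM (what is proved, stated in full; the proofs are below) =====
def Claim_equal_solve : Prop := ∀ (a : List Int), Dom_solve a → Spec_solve a (solve a)

-- ===== LEMMAS AND PROOFS =====

-- ---- A-side: the two-pointer loop sums the first ceil(L/2) odds ----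
def sumIdx (odds : List Int) (i : Int) : Nat → Int
  | 0 => 0
  | m + 1 => PySem.List.pyGetD odds i 0 + sumIdx odds (i + 1) m

theorem solveLoop_eq_aux (odds : List Int) : ∀ (n : Nat) (i j ans : Int),
    (j + 1 - i).toNat = n →
    solveLoop odds i j ans = ans + sumIdx odds i (((j + 1 - i).toNat + 1) / 2) := by
  intro n
  induction n using Nat.strong_induction_on with
  | _ n ih =>
    intro i j ans hn
    rw [solveLoop]
    by_cases h : j ≥ i
    · rw [if_pos h,
        ih ((j - 1 + 1 - (i + 1)).toNat) (by omega) (i + 1) (j - 1) _ rfl]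
      have hc : ((j + 1 - i).toNat + 1) / 2 = ((j - 1 + 1 - (i + 1)).toNat + 1) / 2 + 1 := by
        omega
      rw [hc, sumIdx]
      ring
    · rw [if_neg h]
      have hc : ((j + 1 - i).toNat + 1) / 2 = 0 := by omega
      rw [hc, sumIdx]
      ring

theorem solveLoop_eq (odds : List Int) (i j ans : Int) :
    solveLoop odds i j ans = ans + sumIdx odds i (((j + 1 - i).toNat + 1) / 2) :=
  solveLoop_eq_aux odds _ i j ans rfl

theorem sumIdx_eq_take (odds : List Int) (m i : Nat) (h : i + m ≤ odds.length) :
    sumIdx odds (i : Int) m = ((odds.drop i).take m).sum := by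
  induction m generalizing i with
  | zero => simp [sumIdx]
  | succ m ih =>
      have hi : i < odds.length := by omega
      have hcast : ((i : Int) + 1) = ((i + 1 : Nat) : Int) := by push_cast; ring
      rw [sumIdx, hcast, ih (i + 1) (by omega), PySem.List.pyGetD_natCast,
        List.getD_eq_getElem odds 0 hi]
      conv_rhs => rw [← List.getElem_cons_drop hi, List.take_succ_cons, List.sum_cons]

-- A's result on nonempty odds: evensum + take ceil(L/2) of the (descending-sorted) odds.
theorem solve_eq_char (a : List Int)
    (hodds : ((PySem.List.sorted a (fun x => x) true).filter
        (fun el => PySem.Int.mod el 2 == 1)) ≠ []) :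
    solve a = ((PySem.List.sorted a (fun x => x) true).filter
        (fun el => PySem.Int.mod el 2 == 0)).sum
      + (((PySem.List.sorted a (fun x => x) true).filter
          (fun el => PySem.Int.mod el 2 == 1)).take
          ((((PySem.List.sorted a (fun x => x) true).filter
            (fun el => PySem.Int.mod el 2 == 1)).length + 1) / 2)).sum := by
  simp only [solve]
  set s := PySem.List.sorted a (fun x => x) true with hs
  set odds := s.filter (fun el => PySem.Int.mod el 2 == 1) with ho
  have hn : 1 ≤ odds.length := List.length_pos_iff.mpr hodds
  have hne : ((odds.length : Int) == 0) = false := by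
    simp only [beq_eq_false_iff_ne, ne_eq]
    omega
  rw [hne]
  simp only [Bool.false_eq_true, if_false]
  rw [solveLoop_eq]
  have htoNat : (((odds.length : Int) - 1 + 1 - 0).toNat + 1) / 2 = (odds.length + 1) / 2 := by
    omega
  rw [htoNat]
  have h0 : (0 : Int) = ((0 : Nat) : Int) := rfl
  rw [h0, sumIdx_eq_take odds ((odds.length + 1) / 2) 0 (by omega)]
  simp

-- ---- B-side: the fold splits a into the even total and the odds (in order) ----
theorem foldl_split (a : List Int) : ∀ (e : Int) (o : List Int),
    a.foldl (fun (st : Int × List Int) x =>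
      if PySem.Int.mod x 2 == 0 then (st.1 + x, st.2) else (st.1, st.2 ++ [x])) (e, o)
    = (e + (a.filter (fun x => PySem.Int.mod x 2 == 0)).sum,
       o ++ a.filter (fun x => !(PySem.Int.mod x 2 == 0))) := by
  induction a with
  | nil => intro e o; simp
  | cons x t ih =>
      intro e o
      rw [List.foldl_cons]
      by_cases h : (PySem.Int.mod x 2 == 0) = true
      · rw [if_pos h, ih]
        have hf1 : List.filter (fun y => PySem.Int.mod y 2 == 0) (x :: t)
            = x :: List.filter (fun y => PySem.Int.mod y 2 == 0) t :=
          List.filter_cons_of_pos h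
        have hf2 : List.filter (fun y => !(PySem.Int.mod y 2 == 0)) (x :: t)
            = List.filter (fun y => !(PySem.Int.mod y 2 == 0)) t :=
          List.filter_cons_of_neg (by intro hc; rw [h] at hc; simp at hc)
        rw [hf1, hf2, List.sum_cons, add_assoc]
      · rw [if_neg h, ih]
        have hb : (PySem.Int.mod x 2 == 0) = false := Bool.eq_false_iff.mpr h
        have hf1 : List.filter (fun y => PySem.Int.mod y 2 == 0) (x :: t)
            = List.filter (fun y => PySem.Int.mod y 2 == 0) t :=
          List.filter_cons_of_neg h
        have hf2 : List.filter (fun y => !(PySem.Int.mod y 2 == 0)) (x :: t)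
            = x :: List.filter (fun y => !(PySem.Int.mod y 2 == 0)) t :=
          List.filter_cons_of_pos (by rw [hb]; rfl)
        rw [hf1, hf2]
        simp

-- the two odd predicates agree on Int
theorem odd_pred_eq (l : List Int) :
    l.filter (fun x => !(PySem.Int.mod x 2 == 0)) = l.filter (fun el => PySem.Int.mod el 2 == 1) :=
  List.filter_congr (fun x _ => by
    rcases Int.emod_two_eq x with h | h <;> simp [h])

-- descending-sorted (Pairwise ≥) permutations are equal
theorem desc_eq_of_perm {l1 l2 : List Int} (h : l1.Perm l2)
    (s1 : l1.Pairwise (fun x y => y ≤ x)) (s2 : l2.Pairwise (fun x y => y ≤ x)) : l1 = l2 :=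
  h.eq_of_pairwise (fun _ _ _ _ h1 h2 => le_antisymm h2 h1) s1 s2

-- filter commutes with the descending sort (both are descending rearrangements of filter p a)
theorem filter_sorted_comm (a : List Int) (p : Int → Bool) :
    (PySem.List.sorted a (fun x => x) true).filter p
      = PySem.List.sorted (a.filter p) (fun x => x) true := by
  apply desc_eq_of_perm
  · exact ((PySem.List.sorted_perm a (fun x => x) true).filter p).trans
      ((PySem.List.sorted_perm (a.filter p) (fun x => x) true)).symm
  · exact List.Pairwise.filter p (PySem.List.sorted_pairwise_rev a (fun x => x))
  · exact PySem.List.sorted_pairwise_rev (a.filter p) (fun x => x)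

-- three-way partition of xs around a pivot is a permutation of xs
theorem three_perm (xs : List Int) (p : Int) :
    (xs.filter (fun x => decide (x > p))
      ++ (xs.filter (fun x => x == p) ++ xs.filter (fun x => decide (x < p)))).Perm xs := by
  have h1 := xs.filter_append_perm (fun x => decide (x > p))
  have e1 : (xs.filter (fun x => !decide (x > p))).filter (fun x => x == p)
      = xs.filter (fun x => x == p) := by
    rw [List.filter_filter]
    apply List.filter_congr
    intro x _
    by_cases hx : x = p <;> simp [hx]
  have e2 : (xs.filter (fun x => !decide (x > p))).filter (fun x => !(x == p))
      = xs.filter (fun x => decide (x < p)) := by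
    rw [List.filter_filter]
    apply List.filter_congr
    intro x _
    by_cases h1 : x = p
    · simp [h1]
    · by_cases h2 : x < p <;> simp [h1, h2] <;> omega
  have h2 := (xs.filter (fun x => !decide (x > p))).filter_append_perm (fun x => x == p)
  rw [e1, e2] at h2
  exact ((List.Perm.refl _).append h2).trans h1

theorem all_eq_pivot {xs : List Int} {p x : Int}
    (hx : x ∈ xs.filter (fun x => x == p)) : x = p :=
  eq_of_beq (List.mem_filter.mp hx).2

theorem pairwise_of_const {l : List Int} {p : Int} (h : ∀ x ∈ l, x = p) :
    l.Pairwise (fun x y : Int => y ≤ x) := by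
  induction l with
  | nil => exact List.Pairwise.nil
  | cons a t ih =>
      rw [List.pairwise_cons]
      exact ⟨fun y hy => by
          rw [h a List.mem_cons_self, h y (List.mem_cons_of_mem _ hy)],
        ih (fun x hx => h x (List.mem_cons_of_mem _ hx))⟩

theorem sum_of_const {l : List Int} {p : Int} (h : ∀ x ∈ l, x = p) :
    l.sum = p * l.length := by
  induction l with
  | nil => simp
  | cons a t ih =>
      rw [List.sum_cons, ih (fun x hx => h x (List.mem_cons_of_mem _ hx)),
        h a List.mem_cons_self, List.length_cons]
      push_cast
      ring

-- the descending sort decomposes around any pivot value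
theorem sorted_partition (xs : List Int) (p : Int) :
    PySem.List.sorted xs (fun x => x) true
      = PySem.List.sorted (xs.filter (fun x => decide (x > p))) (fun x => x) true
        ++ (xs.filter (fun x => x == p)
          ++ PySem.List.sorted (xs.filter (fun x => decide (x < p))) (fun x => x) true) := by
  apply desc_eq_of_perm
  · have ph : (PySem.List.sorted (xs.filter (fun x => decide (x > p))) (fun x => x) true).Perm
        (xs.filter (fun x => decide (x > p))) := PySem.List.sorted_perm _ (fun x => x) true
    have pl : (PySem.List.sorted (xs.filter (fun x => decide (x < p))) (fun x => x) true).Perm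
        (xs.filter (fun x => decide (x < p))) := PySem.List.sorted_perm _ (fun x => x) true
    have pm : (xs.filter (fun x => x == p)).Perm (xs.filter (fun x => x == p)) := List.Perm.refl _
    exact (PySem.List.sorted_perm xs (fun x => x) true).trans
      ((ph.append (pm.append pl)).trans (three_perm xs p)).symm
  · exact PySem.List.sorted_pairwise_rev xs (fun x => x)
  · rw [List.pairwise_append]
    refine ⟨PySem.List.sorted_pairwise_rev _ (fun x => x), ?_, ?_⟩
    · rw [List.pairwise_append]
      refine ⟨pairwise_of_const (fun x hx => all_eq_pivot hx), PySem.List.sorted_pairwise_rev _ (fun x => x), ?_⟩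
      intro x hx y hy
      have hxp : x = p := all_eq_pivot hx
      have hyp : y < p := by
        have := (List.mem_filter.mp ((PySem.List.mem_sorted _ _ _ _).mp hy)).2
        simpa using this
      omega
    · intro x hx y hy
      have hxp : p < x := by
        have := (List.mem_filter.mp ((PySem.List.mem_sorted _ _ _ _).mp hx)).2
        simpa using this
      rcases List.mem_append.mp hy with hy | hy
      · have := all_eq_pivot hy; omega
      · have hyp : y < p := by
          have := (List.mem_filter.mp ((PySem.List.mem_sorted _ _ _ _).mp hy)).2
          simpa using this
        omega

-- topSum computes the sum of the first k elements of the descending sort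
theorem topSum_eq (fuel : Nat) : ∀ (xs : List Int) (k : Nat), k ≤ xs.length →
    xs.length ≤ fuel →
    topSum fuel (k : Int) xs = ((PySem.List.sorted xs (fun x => x) true).take k).sum := by
  induction fuel with
  | zero =>
      intro xs k hk hf
      have hxs : xs = [] := List.eq_nil_of_length_eq_zero (by omega)
      have hk0 : k = 0 := by omega
      subst hxs hk0
      simp [topSum, (PySem.List.sorted_eq_nil_iff _ _ _).mpr rfl]
  | succ fuel ih =>
      intro xs k hk hf
      rw [topSum]
      by_cases hk0 : k = 0
      · subst hk0
        simp
      · rw [if_neg (by simpa using hk0)]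
        by_cases hklen : k = xs.length
        · rw [if_pos (by simp [hklen])]
          have hlen : k = (PySem.List.sorted xs (fun x => x) true).length := by
            rw [PySem.List.length_sorted, hklen]
          rw [hlen, List.take_length]
          exact ((PySem.List.sorted_perm xs (fun x => x) true).sum_eq).symm
        · rw [if_neg (by simpa using hklen)]
          have hklt : k < xs.length := by omega
          have hk1 : 1 ≤ k := by omega
          have hidx : xs.length / 2 < xs.length := by omega
          have hpdef : PySem.List.pyGetD xs (PySem.Int.floordiv (xs.length : Int) 2) 0
              = xs[xs.length / 2] := by
            rw [show PySem.Int.floordiv (xs.length : Int) 2 = ((xs.length / 2 : Nat) : Int) from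
                by exact_mod_cast PySem.Int.floordiv_natCast xs.length 2,
              PySem.List.pyGetD_natCast, List.getD_eq_getElem xs 0 hidx]
          set p := PySem.List.pyGetD xs (PySem.Int.floordiv (xs.length : Int) 2) 0 with hp
          have hpmem : p ∈ xs := hpdef ▸ List.getElem_mem hidx
          have hperm := three_perm xs p
          have hlen3 : (xs.filter (fun x => decide (x > p))).length
              + ((xs.filter (fun x => x == p)).length
                + (xs.filter (fun x => decide (x < p))).length) = xs.length := by
            simpa using hperm.length_eq
          have hpm : p ∈ xs.filter (fun x => x == p) := List.mem_filter.mpr ⟨hpmem, by simp⟩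
          have heq1 : 1 ≤ (xs.filter (fun x => x == p)).length :=
            List.length_pos_iff.mpr (List.ne_nil_of_mem hpm)
          have hshi : (PySem.List.sorted (xs.filter (fun x => decide (x > p))) (fun x => x) true).length
              = (xs.filter (fun x => decide (x > p))).length :=
            PySem.List.length_sorted ..
          rw [sorted_partition xs p]
          by_cases hc1 : k ≤ (xs.filter (fun x => decide (x > p))).length
          · rw [if_pos (by exact_mod_cast hc1),
              List.take_append_of_le_length (by omega),
              ih (xs.filter (fun x => decide (x > p))) k hc1 (by omega)]
          · rw [if_neg (by omega)]
            rw [List.take_append, List.take_of_length_le (by omega), List.sum_append,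
              (PySem.List.sorted_perm (xs.filter (fun x => decide (x > p))) (fun x => x) true).sum_eq]
            by_cases hc2 : k ≤ (xs.filter (fun x => decide (x > p))).length
                + (xs.filter (fun x => x == p)).length
            · rw [if_pos (by omega)]
              rw [List.take_append_of_le_length (by omega)]
              have hall : ∀ x ∈ (xs.filter (fun x => x == p)).take
                  (k - (PySem.List.sorted (xs.filter (fun x => decide (x > p))) (fun x => x) true).length),
                  x = p := fun x hx => all_eq_pivot (List.mem_of_mem_take hx)
              rw [sum_of_const hall, List.length_take, hshi]
              have hmin : min (k - (xs.filter (fun x => decide (x > p))).length)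
                  (xs.filter (fun x => x == p)).length
                  = k - (xs.filter (fun x => decide (x > p))).length := by omega
              rw [hmin, Nat.cast_sub (by omega)]
            · rw [if_neg (by omega)]
              rw [List.take_append, List.take_of_length_le (by omega), List.sum_append, hshi]
              have hcast : (k : Int) - ((xs.filter (fun x => decide (x > p))).length : Int)
                  - ((xs.filter (fun x => x == p)).length : Int)
                  = ((k - (xs.filter (fun x => decide (x > p))).length
                      - (xs.filter (fun x => x == p)).length : Nat) : Int) := by omega
              rw [hcast, ih (xs.filter (fun x => decide (x < p)))
                (k - (xs.filter (fun x => decide (x > p))).length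
                  - (xs.filter (fun x => x == p)).length) (by omega) (by omega)]
              ring

-- ===== VERDICT (by name: the statement is the Claim_ definition above) =====
theorem solve_spec : Claim_equal_solve := by
  intro a _
  simp only [Spec_solve, solve_alt, foldl_split, odd_pred_eq, List.nil_append, zero_add]
  set odds := a.filter (fun el => PySem.Int.mod el 2 == 1) with ho
  by_cases hE : odds.isEmpty
  · -- no odds anywhere: both return 0
    have hnil : odds = [] := List.isEmpty_iff.mp hE
    have hsf : (PySem.List.sorted a (fun x => x) true).filter
        (fun el => PySem.Int.mod el 2 == 1) = [] := by
      rw [filter_sorted_comm, ← ho, hnil]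
      exact (PySem.List.sorted_eq_nil_iff _ _ _).mpr rfl
    rw [if_pos hE]
    simp only [solve, hsf, List.length_nil, Nat.cast_zero]
    norm_num
  · have hnil : odds ≠ [] := fun h => hE (by simp [h])
    have hsf : (PySem.List.sorted a (fun x => x) true).filter
        (fun el => PySem.Int.mod el 2 == 1) = PySem.List.sorted odds (fun x => x) true := by
      rw [filter_sorted_comm, ← ho]
    have hsn : PySem.List.sorted odds (fun x => x) true ≠ [] := by
      intro h
      exact hnil ((PySem.List.sorted_eq_nil_iff _ _ _).mp h)
    rw [solve_eq_char a (by rw [hsf]; exact hsn)]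
    simp only [hE, Bool.false_eq_true, if_false, hsf]
    have hlen : (PySem.List.sorted odds (fun x => x) true).length = odds.length :=
      PySem.List.length_sorted ..
    have hk : PySem.Int.floordiv ((odds.length : Int) + 1) 2
        = (((odds.length + 1) / 2 : Nat) : Int) := by
      have hc : ((odds.length : Int) + 1) = ((odds.length + 1 : Nat) : Int) := by push_cast; ring
      rw [hc]
      exact_mod_cast PySem.Int.floordiv_natCast (odds.length + 1) 2
    rw [hk, topSum_eq odds.length odds ((odds.length + 1) / 2) (by omega) le_rfl, hlen]
    congr 1
    exact ((PySem.List.sorted_perm a (fun x => x) true).filter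
      (fun el => PySem.Int.mod el 2 == 0)).sum_eq
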